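-- pv_equiv track=rewrite | github.com/fdslight/ixcsys | pywind/lib/template2/syntax_parser.py | __scan_text_for_syntax_postion
-- ===== SOURCE A (Python) =====
-- TEXT_TYPE_CRLF = 1
--
-- TEXT_TYPE_VAR_LEFT = 2
--
-- TEXT_TYPE_VAR_RIGHT = 4
--
-- TEXT_TYPE_LOGIC_LEFT = 5
--
-- TEXT_TYPE_LOGIC_RIGHT = 7
--
-- def __scan_text_for_syntax_postion(s: str):
--     """首先对文本进行扫描,获取语法相关位置信息
--     """
--     line_no = 1
--     results = []
--     b = 0
--     while 1:
--         try:
--             if s[b] == "\n":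
--                 results.append((line_no, TEXT_TYPE_CRLF, b))
--                 b = b + 1
--                 line_no += 1
--                 continue
--             ''''''
--         except IndexError:
--             break
--         border = s[b:b + 2]
--
--         if border == "": break
--         text_type = 0
--         if border == "{{":
--             flags = True
--             text_type = TEXT_TYPE_VAR_LEFT
--         elif border == "}}":
--             flags = True
--             text_type = TEXT_TYPE_VAR_RIGHT
--         elif border == "{%":
--             flags = True
--             text_type = TEXT_TYPE_LOGIC_LEFT
--         elif border == "%}":
--             flags = True
--             text_type = TEXT_TYPE_LOGIC_RIGHT
--         else:
--             flags = False
--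
--         if flags: results.append((line_no, text_type, b))
--         b += 1
--     return results
-- ===== SOURCE B (Python) =====
-- def __scan_text_for_syntax_postion(s: str):
--     events = []
--     for tok, ttype in (("\n", 1), ("{{", 2), ("}}", 4), ("{%", 5), ("%}", 7)):
--         i = s.find(tok)
--         while i != -1:
--             events.append((i, ttype))
--             i = s.find(tok, i + 1)
--     events.sort(key=lambda e: e[0])
--     out = []
--     nl = 0
--     for pos, ttype in events:
--         out.append((1 + nl, ttype, pos))
--         if ttype == 1:
--             nl += 1
--     return out
-- ===== Notes on version B (the rewrite author's own statement) =====
-- stated objective: alternative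
-- what changed: B replaces A's single left-to-right Python-level scan (per-index slicing, inline line counting) by collecting all occurrences of each of the five patterns with repeated str.find, sorting the events by position, and assigning line numbers in one final pass; the per-character work moves into C-level str.find, which a timing run measured as much faster.
import Mathlib
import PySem

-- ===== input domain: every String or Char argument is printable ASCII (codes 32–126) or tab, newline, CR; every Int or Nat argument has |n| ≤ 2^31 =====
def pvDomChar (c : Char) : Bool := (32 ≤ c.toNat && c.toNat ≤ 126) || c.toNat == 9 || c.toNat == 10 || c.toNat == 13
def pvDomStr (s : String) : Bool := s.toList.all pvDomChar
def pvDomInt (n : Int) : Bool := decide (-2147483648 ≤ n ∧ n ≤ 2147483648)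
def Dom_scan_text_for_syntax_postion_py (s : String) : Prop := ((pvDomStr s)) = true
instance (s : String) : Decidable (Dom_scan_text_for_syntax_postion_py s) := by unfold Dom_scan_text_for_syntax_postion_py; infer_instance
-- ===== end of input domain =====

-- B replaces A's char-by-char scan with find-all-occurrences per token, a sort by position,
-- and one line-numbering pass (measured faster: the scan moves into C-level str.find).


-- ===== PORT A =====
-- literal port of A's while-loop: index b, line counter, results accumulator
def pvScanA (cs : List Char) (lineNo : Int) (results : List (Int × Int × Int)) (b : Nat) :
    List (Int × Int × Int) :=
  if h : b < cs.length then
    if cs[b] = '\n' then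
      pvScanA cs (lineNo + 1) (results ++ [(lineNo, 1, (b : Int))]) (b + 1)
    else
      -- border = s[b:b+2]
      let border := PySem.List.slice cs (some (b : Int)) (some ((b : Int) + 2))
      if border = [] then results
      else
        let ft : Bool × Int :=
          if border = ['{', '{'] then (true, 2)
          else if border = ['}', '}'] then (true, 4)
          else if border = ['{', '%'] then (true, 5)
          else if border = ['%', '}'] then (true, 7)
          else (false, 0)
        if ft.1 then pvScanA cs lineNo (results ++ [(lineNo, ft.2, (b : Int))]) (b + 1)
        else pvScanA cs lineNo results (b + 1)
  else results  -- IndexError on s[b]: break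
termination_by cs.length - b

def scan_text_for_syntax_postion_py (s : String) : List (Int × Int × Int) :=
  pvScanA s.toList 1 [] 0

-- ===== PORT B =====
-- termination helpers for the repeated-find loop (cited by pvTokOccs's decreasing_by)
theorem pvFindFrom_gt_len (cs sub : List Char) (k : Nat) (h : cs.length < k) :
    PySem.Chars.findFrom cs sub (k : Int) = -1 := by
  simp only [PySem.Chars.findFrom]
  have h0 : ¬ ((k : Int) < 0) := by omega
  simp only [h0, if_false]
  rw [if_pos (by exact_mod_cast h)]

theorem pvFindFrom_bounds (cs sub : List Char) (k : Nat)
    (h : PySem.Chars.findFrom cs sub (k : Int) ≠ -1) :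
    k ≤ cs.length ∧ k ≤ (PySem.Chars.findFrom cs sub (k : Int)).toNat := by
  have hk : k ≤ cs.length := by
    by_contra hk
    exact h (pvFindFrom_gt_len cs sub k (by omega))
  obtain ⟨h1, _, _⟩ := PySem.Chars.findFrom_natCast_spec cs sub k hk h
  exact ⟨hk, by omega⟩

-- i = s.find(tok, start); while i != -1: events.append((i, ttype)); i = s.find(tok, i+1)
def pvTokOccs (cs tok : List Char) (ttype : Int) (start : Nat) :
    List (Int × Int) :=
  let i := PySem.Chars.findFrom cs tok (start : Int)
  if h : i = -1 then []
  else (i, ttype) :: pvTokOccs cs tok ttype (i.toNat + 1)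
termination_by cs.length + 1 - start
decreasing_by
  obtain ⟨h1, h2⟩ := pvFindFrom_bounds cs tok start h
  omega

def pvEvents (cs : List Char) : List (Int × Int) :=
  [(['\n'], (1 : Int)), (['{', '{'], 2), (['}', '}'], 4), (['{', '%'], 5), (['%', '}'], 7)].foldl
    (fun acc p => acc ++ pvTokOccs cs p.1 p.2 0) []

def scan_text_for_syntax_postion_py_alt (s : String) : List (Int × Int × Int) :=
  let events := PySem.List.sorted (pvEvents s.toList) (fun e => e.1)
  (events.foldl
    (fun (st : List (Int × Int × Int) × Int) e =>
      (st.1 ++ [(1 + st.2, e.2, e.1)], if e.2 = 1 then st.2 + 1 else st.2))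
    ([], 0)).1

-- ===== PRECONDITION & SPEC =====
def Spec_scan_text_for_syntax_postion_py (s : String) (out : List (Int × Int × Int)) : Prop := out = scan_text_for_syntax_postion_py_alt s
instance (s : String) (out : List (Int × Int × Int)) : Decidable (Spec_scan_text_for_syntax_postion_py s out) := by unfold Spec_scan_text_for_syntax_postion_py; infer_instance

-- ===== CLAIM (what is proved, stated in full; the proofs are below) =====
def Claim_equal_scan_text_for_syntax_postion_py : Prop := ∀ (s : String), Dom_scan_text_for_syntax_postion_py s → Spec_scan_text_for_syntax_postion_py s (scan_text_for_syntax_postion_py s)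

-- ===== LEMMAS AND PROOFS =====

-- the event (if any) A records at position b, in A's branch order
def pvEvType (cs : List Char) (b : Nat) : Option Int :=
  if ['\n'] <+: cs.drop b then some 1
  else if ['{', '{'] <+: cs.drop b then some 2
  else if ['}', '}'] <+: cs.drop b then some 4
  else if ['{', '%'] <+: cs.drop b then some 5
  else if ['%', '}'] <+: cs.drop b then some 7
  else none

def pvEvF (cs : List Char) (b : Nat) : Option (Int × Int) :=
  (pvEvType cs b).map (fun t => ((b : Int), t))

def pvCanonFrom (cs : List Char) (b : Nat) : List (Int × Int) :=
  (List.range' b (cs.length - b)).filterMap (pvEvF cs)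

def pvCanon (cs : List Char) : List (Int × Int) :=
  (List.range cs.length).filterMap (pvEvF cs)

def pvLinePass : List (Int × Int) → Int → List (Int × Int × Int)
  | [], _ => []
  | (p, t) :: rest, ln => (ln, t, p) :: pvLinePass rest (if t = 1 then ln + 1 else ln)

theorem pvTake2_eq (l tok : List Char) (h : tok.length = 2) :
    ((l.take 2 = tok) ↔ tok <+: l) := by
  constructor
  · intro he; exact he ▸ List.take_prefix 2 l
  · intro hp
    have := List.prefix_iff_eq_take.mp hp
    rw [h] at this; exact this.symm

theorem pvCanonFrom_stop (cs : List Char) (b : Nat) (h : cs.length ≤ b) :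
    pvCanonFrom cs b = [] := by
  simp [pvCanonFrom, Nat.sub_eq_zero_of_le h]

theorem pvCanonFrom_step (cs : List Char) (b : Nat) (h : b < cs.length) :
    pvCanonFrom cs b =
      (match pvEvType cs b with | some t => [((b : Int), t)] | none => []) ++
        pvCanonFrom cs (b + 1) := by
  rw [pvCanonFrom, show cs.length - b = (cs.length - (b + 1)) + 1 by omega, List.range'_succ,
    List.filterMap_cons]
  cases hev : pvEvType cs b with
  | none => simp [pvEvF, hev, pvCanonFrom]
  | some t => simp [pvEvF, hev, pvCanonFrom]

theorem pvScanA_eq (cs : List Char) (n : Nat) : ∀ b, n = cs.length - b →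
    ∀ (lineNo : Int) (acc : List (Int × Int × Int)),
    pvScanA cs lineNo acc b = acc ++ pvLinePass (pvCanonFrom cs b) lineNo := by
  induction n using Nat.strong_induction_on with
  | _ n ih =>
  intro b hn lineNo acc
  rw [pvScanA]
  by_cases hb : b < cs.length
  case neg =>
    rw [dif_neg hb, pvCanonFrom_stop cs b (by omega)]
    simp [pvLinePass]
  case pos =>
  rw [dif_pos hb, pvCanonFrom_step cs b hb]
  have hdrop : cs.drop b = cs[b] :: cs.drop (b + 1) := List.drop_eq_getElem_cons hb
  have hnl : (['\n'] <+: cs.drop b) ↔ cs[b] = '\n' := by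
    rw [hdrop, List.cons_prefix_cons]
    simp only [List.nil_prefix, and_true]
    exact eq_comm
  have hslice : PySem.List.slice cs (some (b : Int)) (some ((b : Int) + 2)) =
      (cs.drop b).take 2 := by
    rw [show ((b : Int) + 2) = ((b + 2 : Nat) : Int) by push_cast; ring,
      PySem.List.slice_natCast]
    congr 1
    omega
  have hmeas : cs.length - (b + 1) < n := by omega
  by_cases hc : cs[b] = '\n'
  · rw [if_pos hc]
    have hev : pvEvType cs b = some 1 := by
      unfold pvEvType
      rw [if_pos (hnl.mpr hc)]
    rw [hev, ih _ hmeas (b + 1) rfl]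
    simp [pvLinePass]
  · rw [if_neg hc]
    have hbne : ¬ ((cs.drop b).take 2 = []) := by
      rw [List.take_eq_nil_iff]
      rintro (h | h)
      · exact absurd h (by decide)
      · exact absurd (List.drop_eq_nil_iff.mp h) (by omega)
    unfold pvEvType
    rw [hslice, if_neg hbne, if_neg (fun hp => hc (hnl.mp hp))]
    simp only [pvTake2_eq (cs.drop b) ['{', '{'] (by decide),
      pvTake2_eq (cs.drop b) ['}', '}'] (by decide),
      pvTake2_eq (cs.drop b) ['{', '%'] (by decide),
      pvTake2_eq (cs.drop b) ['%', '}'] (by decide)]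
    split_ifs <;>
      simp_all [pvLinePass, ih _ hmeas (b + 1) rfl]

theorem pvTokOccs_mem (cs tok : List Char) (t : Int) (hsub : tok ≠ []) (n : Nat) :
    ∀ start, n = cs.length + 1 - start → ∀ q : Int × Int,
    (q ∈ pvTokOccs cs tok t start ↔
      q.2 = t ∧ ∃ p : Nat, q.1 = (p : Int) ∧ start ≤ p ∧ tok <+: cs.drop p) := by
  induction n using Nat.strong_induction_on with
  | _ n ih =>
  intro start hn q
  rw [pvTokOccs]
  by_cases hneg : PySem.Chars.findFrom cs tok (start : Int) = -1
  · rw [dif_pos hneg]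
    simp only [List.not_mem_nil, false_iff, not_and]
    rintro - ⟨p, hq1, hsp, hpre⟩
    by_cases hsl : start ≤ cs.length
    · have hinf : tok <:+: cs.drop start := by
        rw [← PySem.Chars.isIn_iff_infix, ← PySem.Chars.exists_prefix_drop_iff_isIn]
        exact ⟨p - start, by rw [List.drop_drop, Nat.add_sub_cancel' hsp]; exact hpre⟩
      exact (PySem.Chars.findFrom_natCast_eq_neg_one_iff cs tok start hsl).mp hneg hinf
    · have : cs.drop p = [] := List.drop_eq_nil_iff.mpr (by omega)
      rw [this, List.prefix_nil] at hpre
      exact hsub hpre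
  · rw [dif_neg hneg]
    have hsl : start ≤ cs.length := by
      by_contra hk
      exact hneg (pvFindFrom_gt_len cs tok start (by omega))
    obtain ⟨hge, hpre, hmin⟩ := PySem.Chars.findFrom_natCast_spec cs tok start hsl hneg
    set i := PySem.Chars.findFrom cs tok (start : Int) with hidef
    have hi0 : (0 : Int) ≤ i := by omega
    have hic : ((i.toNat : Nat) : Int) = i := Int.toNat_of_nonneg hi0
    have hrec := ih (cs.length + 1 - (i.toNat + 1)) (by
      have := hpre.length_le
      have := List.length_drop (l := cs) (i := i.toNat)
      have hlen : 0 < tok.length := List.length_pos_iff.mpr hsub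
      omega) (i.toNat + 1) rfl q
    simp only [List.mem_cons, hrec]
    constructor
    · rintro (rfl | ⟨h2, p, h1, hsp, hp⟩)
      · exact ⟨rfl, i.toNat, hic.symm, by omega, hpre⟩
      · exact ⟨h2, p, h1, by omega, hp⟩
    · rintro ⟨h2, p, h1, hsp, hp⟩
      rcases lt_trichotomy p i.toNat with hlt | heq | hgt
      · exact absurd hp (hmin p hsp hlt)
      · left
        obtain ⟨x, u⟩ := q
        simp only [Prod.mk.injEq]
        subst heq
        exact ⟨h1.trans hic, h2⟩
      · exact Or.inr ⟨h2, p, h1, by omega, hp⟩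

theorem pvTokOccs_pairwise (cs tok : List Char) (t : Int) (hsub : tok ≠ []) (n : Nat) :
    ∀ start, n = cs.length + 1 - start →
    List.Pairwise (fun a b : Int × Int => a.1 < b.1) (pvTokOccs cs tok t start) := by
  induction n using Nat.strong_induction_on with
  | _ n ih =>
  intro start hn
  rw [pvTokOccs]
  by_cases hneg : PySem.Chars.findFrom cs tok (start : Int) = -1
  · rw [dif_pos hneg]; exact List.Pairwise.nil
  · rw [dif_neg hneg]
    obtain ⟨hsl, hge⟩ := pvFindFrom_bounds cs tok start hneg
    set i := PySem.Chars.findFrom cs tok (start : Int) with hidef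
    have hspec := PySem.Chars.findFrom_natCast_spec cs tok start hsl hneg
    have hge' : ((start : Nat) : Int) ≤ i := hspec.1
    have hpre := hspec.2.1
    have hmeas : cs.length + 1 - (i.toNat + 1) < n := by
      have := hpre.length_le
      have := List.length_drop (l := cs) (i := i.toNat)
      have hlen : 0 < tok.length := List.length_pos_iff.mpr hsub
      omega
    refine List.Pairwise.cons ?_ (ih _ hmeas (i.toNat + 1) rfl)
    intro q hq
    obtain ⟨-, p, h1, hsp, -⟩ :=
      (pvTokOccs_mem cs tok t hsub _ (i.toNat + 1) rfl q).mp hq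
    have hi0 : (0 : Int) ≤ i := by omega
    show i < q.1
    rw [h1]
    omega

theorem pvPrefix_head {c c' : Char} {r r' l : List Char} (h : (c :: r) <+: l)
    (h' : (c' :: r') <+: l) : c = c' := by
  cases l with
  | nil => exact absurd h (by simp)
  | cons a l =>
    rw [List.cons_prefix_cons] at h h'
    rw [h.1, h'.1]

theorem pvPrefix_two {a b a' b' : Char} {l : List Char} (h : [a, b] <+: l)
    (h' : [a', b'] <+: l) : a = a' ∧ b = b' := by
  have h1 := List.prefix_iff_eq_take.mp h
  have h2 := List.prefix_iff_eq_take.mp h'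
  simp only [List.length_cons, List.length_nil] at h1 h2
  rw [← h1] at h2
  exact ⟨by injection h2 with e _; exact e.symm, by
    injection h2 with _ e; injection e with e _; exact e.symm⟩

theorem pvPrefix_pos (tok : List Char) (cs : List Char) (b : Nat) (hsub : tok ≠ [])
    (h : tok <+: cs.drop b) : b < cs.length := by
  by_contra hb
  rw [List.drop_eq_nil_iff.mpr (by omega), List.prefix_nil] at h
  exact hsub h

theorem pvEvType_eq_some (cs : List Char) (b : Nat) (t : Int) :
    pvEvType cs b = some t ↔
      ((t = 1 ∧ ['\n'] <+: cs.drop b) ∨ (t = 2 ∧ ['{', '{'] <+: cs.drop b) ∨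
       (t = 4 ∧ ['}', '}'] <+: cs.drop b) ∨ (t = 5 ∧ ['{', '%'] <+: cs.drop b) ∨
       (t = 7 ∧ ['%', '}'] <+: cs.drop b)) := by
  unfold pvEvType
  constructor
  · intro h
    split_ifs at h with h1 h2 h3 h4 h5
    · exact Or.inl ⟨(Option.some.inj h).symm, h1⟩
    · exact Or.inr (Or.inl ⟨(Option.some.inj h).symm, h2⟩)
    · exact Or.inr (Or.inr (Or.inl ⟨(Option.some.inj h).symm, h3⟩))
    · exact Or.inr (Or.inr (Or.inr (Or.inl ⟨(Option.some.inj h).symm, h4⟩)))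
    · exact Or.inr (Or.inr (Or.inr (Or.inr ⟨(Option.some.inj h).symm, h5⟩)))
  · rintro (⟨ht, hp⟩ | ⟨ht, hp⟩ | ⟨ht, hp⟩ | ⟨ht, hp⟩ | ⟨ht, hp⟩) <;> subst ht
    · rw [if_pos hp]
    · rw [if_neg (fun hc => absurd (pvPrefix_head hc hp) (by decide)), if_pos hp]
    · rw [if_neg (fun hc => absurd (pvPrefix_head hc hp) (by decide)),
        if_neg (fun hc => absurd (pvPrefix_head hc hp) (by decide)), if_pos hp]
    · rw [if_neg (fun hc => absurd (pvPrefix_head hc hp) (by decide)),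
        if_neg (fun hc => absurd (pvPrefix_two hc hp).2 (by decide)),
        if_neg (fun hc => absurd (pvPrefix_head hc hp) (by decide) : ¬ _ <+: _), if_pos hp]
    · rw [if_neg (fun hc => absurd (pvPrefix_head hc hp) (by decide)),
        if_neg (fun hc => absurd (pvPrefix_head hc hp) (by decide)),
        if_neg (fun hc => absurd (pvPrefix_head hc hp) (by decide) : ¬ _ <+: _),
        if_neg (fun hc => absurd (pvPrefix_head hc hp) (by decide) : ¬ _ <+: _), if_pos hp]

theorem pvCanon_mem (cs : List Char) (q : Int × Int) :
    q ∈ pvCanon cs ↔ ∃ b : Nat, b < cs.length ∧ pvEvType cs b = some q.2 ∧ q.1 = (b : Int) := by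
  obtain ⟨x, t⟩ := q
  simp only [pvCanon, List.mem_filterMap, List.mem_range, pvEvF, Option.map_eq_some_iff,
    Prod.mk.injEq]
  constructor
  · rintro ⟨b, hb, u, hu, hx, ht⟩
    exact ⟨b, hb, by simp [hu, ht], hx.symm⟩
  · rintro ⟨b, hb, hu, hx⟩
    exact ⟨b, hb, t, hu, hx.symm, rfl⟩

theorem pvCanon_pairwise (cs : List Char) :
    List.Pairwise (fun a b : Int × Int => a.1 < b.1) (pvCanon cs) := by
  rw [pvCanon, List.pairwise_filterMap]
  refine List.pairwise_lt_range.imp ?_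
  rintro a a' hlt x hx y hy
  simp only [pvEvF, Option.map_eq_some_iff] at hx hy
  obtain ⟨u, -, hxu⟩ := hx
  obtain ⟨v, -, hyv⟩ := hy
  rw [← hxu, ← hyv]
  show (a : Int) < (a' : Int)
  exact_mod_cast hlt

theorem pvEvents_shape (cs : List Char) :
    pvEvents cs =
      pvTokOccs cs ['\n'] 1 0 ++ pvTokOccs cs ['{', '{'] 2 0 ++ pvTokOccs cs ['}', '}'] 4 0 ++
        pvTokOccs cs ['{', '%'] 5 0 ++ pvTokOccs cs ['%', '}'] 7 0 := by
  simp [pvEvents]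

theorem pvEvents_perm (cs : List Char) : (pvCanon cs).Perm (pvEvents cs) := by
  have hmem : ∀ (tok : List Char) (t : Int), tok ≠ [] → ∀ (q : Int × Int),
      (q ∈ pvTokOccs cs tok t 0 ↔ q.2 = t ∧ ∃ p : Nat, q.1 = (p : Int) ∧ tok <+: cs.drop p) := by
    intro tok t htok q
    rw [pvTokOccs_mem cs tok t htok _ 0 rfl]
    simp
  have hnd : ∀ (tok : List Char) (t : Int), tok ≠ [] → (pvTokOccs cs tok t 0).Nodup := by
    intro tok t htok
    exact (pvTokOccs_pairwise cs tok t htok _ 0 rfl).imp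
      (fun h he => absurd (he ▸ h) (lt_irrefl _))
  have htyp : ∀ (tok : List Char) (t : Int), tok ≠ [] → ∀ q, q ∈ pvTokOccs cs tok t 0 →
      q.2 = t := fun tok t htok q hq => ((hmem tok t htok q).mp hq).1
  have hstep : ∀ (l1 l2 : List (Int × Int)), l1.Nodup → l2.Nodup →
      (∀ a ∈ l1, ∀ b ∈ l2, a.2 ≠ b.2) → (l1 ++ l2).Nodup := by
    intro l1 l2 h1 h2 h3
    rw [List.nodup_append]
    exact ⟨h1, h2, fun a ha b hb he => h3 a ha b hb (he ▸ rfl)⟩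
  have hcanonND : (pvCanon cs).Nodup :=
    (pvCanon_pairwise cs).imp (fun h he => absurd (he ▸ h) (lt_irrefl _))
  have heventsND : (pvEvents cs).Nodup := by
    rw [pvEvents_shape]
    refine hstep _ _ (hstep _ _ (hstep _ _ (hstep _ _ (hnd _ _ (by simp)) (hnd _ _ (by simp))
      ?_) (hnd _ _ (by simp)) ?_) (hnd _ _ (by simp)) ?_) (hnd _ _ (by simp)) ?_ <;>
      intro a ha b hb <;>
      simp only [List.mem_append] at ha <;>
      [skip; rcases ha with ha | ha; rcases ha with (ha | ha) | ha;
        rcases ha with ((ha | ha) | ha) | ha] <;>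
      first
        | (rw [htyp _ _ (by simp) a ha, htyp _ _ (by simp) b hb]; decide)
  rw [List.perm_ext_iff_of_nodup hcanonND heventsND]
  intro q
  rw [pvCanon_mem, pvEvents_shape]
  simp only [List.mem_append]
  constructor
  · rintro ⟨b, hb, hev, hq1⟩
    rcases (pvEvType_eq_some cs b q.2).mp hev with ⟨ht, hp⟩ | ⟨ht, hp⟩ | ⟨ht, hp⟩ | ⟨ht, hp⟩ |
        ⟨ht, hp⟩
    · exact Or.inl (Or.inl (Or.inl (Or.inl ((hmem _ _ (by simp) q).mpr ⟨ht, b, hq1, hp⟩))))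
    · exact Or.inl (Or.inl (Or.inl (Or.inr ((hmem _ _ (by simp) q).mpr ⟨ht, b, hq1, hp⟩))))
    · exact Or.inl (Or.inl (Or.inr ((hmem _ _ (by simp) q).mpr ⟨ht, b, hq1, hp⟩)))
    · exact Or.inl (Or.inr ((hmem _ _ (by simp) q).mpr ⟨ht, b, hq1, hp⟩))
    · exact Or.inr ((hmem _ _ (by simp) q).mpr ⟨ht, b, hq1, hp⟩)
  · rintro ((((h | h) | h) | h) | h) <;>
      obtain ⟨ht, p, hq1, hp⟩ := (hmem _ _ (by simp) q).mp h
    · exact ⟨p, pvPrefix_pos _ _ _ (by simp) hp, (pvEvType_eq_some cs p q.2).mpr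
        (Or.inl ⟨ht, hp⟩), hq1⟩
    · exact ⟨p, pvPrefix_pos _ _ _ (by simp) hp, (pvEvType_eq_some cs p q.2).mpr
        (Or.inr (Or.inl ⟨ht, hp⟩)), hq1⟩
    · exact ⟨p, pvPrefix_pos _ _ _ (by simp) hp, (pvEvType_eq_some cs p q.2).mpr
        (Or.inr (Or.inr (Or.inl ⟨ht, hp⟩))), hq1⟩
    · exact ⟨p, pvPrefix_pos _ _ _ (by simp) hp, (pvEvType_eq_some cs p q.2).mpr
        (Or.inr (Or.inr (Or.inr (Or.inl ⟨ht, hp⟩)))), hq1⟩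
    · exact ⟨p, pvPrefix_pos _ _ _ (by simp) hp, (pvEvType_eq_some cs p q.2).mpr
        (Or.inr (Or.inr (Or.inr (Or.inr ⟨ht, hp⟩)))), hq1⟩

theorem pvSorted_events (cs : List Char) :
    PySem.List.sorted (pvEvents cs) (fun e : Int × Int => e.1) = pvCanon cs := by
  exact PySem.List.sorted_eq_of_perm_of_pairwise_lt _ _ _ (pvEvents_perm cs) (pvCanon_pairwise cs)

theorem pvFold_eq (evs : List (Int × Int)) : ∀ (out : List (Int × Int × Int)) (nl : Int),
    (evs.foldl
      (fun (st : List (Int × Int × Int) × Int) e =>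
        (st.1 ++ [(1 + st.2, e.2, e.1)], if e.2 = 1 then st.2 + 1 else st.2))
      (out, nl)).1 = out ++ pvLinePass evs (1 + nl) := by
  induction evs with
  | nil => intro out nl; simp [pvLinePass]
  | cons e rest ih =>
    intro out nl
    obtain ⟨p, t⟩ := e
    simp only [List.foldl_cons, pvLinePass]
    rw [ih]
    by_cases h : t = 1 <;> simp [h, List.append_assoc, add_comm, add_left_comm]

-- ===== VERDICT (by name: the statement is the Claim_ definition above) =====
theorem scan_text_for_syntax_postion_py_spec : Claim_equal_scan_text_for_syntax_postion_py := by
  intro s _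
  show scan_text_for_syntax_postion_py s = scan_text_for_syntax_postion_py_alt s
  unfold scan_text_for_syntax_postion_py scan_text_for_syntax_postion_py_alt
  rw [pvSorted_events, pvFold_eq, pvScanA_eq s.toList (s.toList.length - 0) 0 rfl]
  simp [pvCanonFrom, pvCanon, List.range_eq_range']
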